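-- pv_equiv track=rewrite | github.com/CA-git-com-co/ACGS | scripts/validation/identify_critical_missing_files.py | categorize_missing_files
-- ===== SOURCE A (Python) =====
-- from typing import Dict, List, Tuple
--
-- def categorize_missing_files(broken_links: Dict[str, int]) -> Dict[str, List[Tuple[str, int]]]:
--     """Categorize missing files by type and priority"""
--     categories = {
--         'API Documentation': [],
--         'Deployment Guides': [],
--         'Configuration Files': [],
--         'Testing Documentation': [],
--         'Architecture Documentation': [],
--         'Security Documentation': [],
--         'Operations Documentation': [],
--         'Development Documentation': [],
--         'Other': []
--     }
--
--     for url, count in broken_links.items():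
--         if any(keyword in url.lower() for keyword in ['api', 'openapi', 'swagger']):
--             categories['API Documentation'].append((url, count))
--         elif any(keyword in url.lower() for keyword in ['deploy', 'installation', 'setup']):
--             categories['Deployment Guides'].append((url, count))
--         elif any(keyword in url.lower() for keyword in ['config', 'settings', 'env']):
--             categories['Configuration Files'].append((url, count))
--         elif any(keyword in url.lower() for keyword in ['test', 'testing', 'spec']):
--             categories['Testing Documentation'].append((url, count))
--         elif any(keyword in url.lower() for keyword in ['architecture', 'design', 'system']):
--             categories['Architecture Documentation'].append((url, count))
--         elif any(keyword in url.lower() for keyword in ['security', 'auth', 'rbac']):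
--             categories['Security Documentation'].append((url, count))
--         elif any(keyword in url.lower() for keyword in ['operations', 'ops', 'monitoring']):
--             categories['Operations Documentation'].append((url, count))
--         elif any(keyword in url.lower() for keyword in ['development', 'dev', 'contributing']):
--             categories['Development Documentation'].append((url, count))
--         else:
--             categories['Other'].append((url, count))
--
--     # Sort each category by frequency (descending)
--     for category in categories:
--         categories[category].sort(key=lambda x: x[1], reverse=True)
--
--     return categories
-- ===== SOURCE B (Python) =====
-- RULES = [
--     ('API Documentation', ['api', 'openapi', 'swagger']),
--     ('Deployment Guides', ['deploy', 'installation', 'setup']),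
--     ('Configuration Files', ['config', 'settings', 'env']),
--     ('Testing Documentation', ['test', 'testing', 'spec']),
--     ('Architecture Documentation', ['architecture', 'design', 'system']),
--     ('Security Documentation', ['security', 'auth', 'rbac']),
--     ('Operations Documentation', ['operations', 'ops', 'monitoring']),
--     ('Development Documentation', ['development', 'dev', 'contributing']),
-- ]
-- NAMES = [name for name, _ in RULES] + ['Other']
--
--
-- def _cat(url):
--     low = url.lower()
--     for i, (_, keywords) in enumerate(RULES):
--         if any(k in low for k in keywords):
--             return i
--     return len(RULES)
--
--
-- def categorize_missing_files(broken_links):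
--     items = list(broken_links.items())
--     return {
--         name: sorted((p for p in items if _cat(p[0]) == i),
--                      key=lambda p: p[1], reverse=True)
--         for i, name in enumerate(NAMES)
--     }
-- ===== Notes on version B (the rewrite author's own statement) =====
-- stated objective: idiomatic
-- what changed: The nine-way if-elif cascade mutating a pre-built dict is replaced by an ordered rule table with a first-match category-index helper, and the result dict is built in one comprehension that filters and sorts each category's links per category.
import Mathlib
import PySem

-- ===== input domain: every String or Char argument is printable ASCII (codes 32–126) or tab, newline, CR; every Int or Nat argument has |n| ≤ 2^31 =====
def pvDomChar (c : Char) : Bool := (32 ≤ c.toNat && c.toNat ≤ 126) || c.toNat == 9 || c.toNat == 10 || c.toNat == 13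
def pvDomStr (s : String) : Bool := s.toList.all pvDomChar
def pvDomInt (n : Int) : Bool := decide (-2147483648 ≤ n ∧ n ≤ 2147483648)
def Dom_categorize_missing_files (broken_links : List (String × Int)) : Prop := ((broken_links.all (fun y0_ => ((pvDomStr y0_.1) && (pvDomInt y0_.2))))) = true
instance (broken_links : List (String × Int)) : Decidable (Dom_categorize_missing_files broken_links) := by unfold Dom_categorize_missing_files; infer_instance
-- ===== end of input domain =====

-- B replaces the if-elif cascade mutating a pre-built dict by an ordered rule table with a
-- first-match index helper and a per-category filter-and-sort comprehension (idiomatic; same cost).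


-- ===== PORT A =====
-- 'any(keyword in url.lower() for keyword in kws)'
def aMatch (url : String) (kws : List String) : Bool :=
  kws.any (fun kw => PySem.Str.isIn kw (PySem.Str.lower url))

def aInit : PySem.Dict String (List (String × Int)) :=
  PySem.Dict.ofList
    [("API Documentation", []), ("Deployment Guides", []), ("Configuration Files", []),
     ("Testing Documentation", []), ("Architecture Documentation", []),
     ("Security Documentation", []), ("Operations Documentation", []),
     ("Development Documentation", []), ("Other", [])]

-- the if/elif cascade of A's loop body ('categories[...].append((url, count))')
def aStep (cats : PySem.Dict String (List (String × Int))) (p : String × Int) :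
    PySem.Dict String (List (String × Int)) :=
  if aMatch p.1 ["api", "openapi", "swagger"] then
    cats.modify "API Documentation" [] (· ++ [p])
  else if aMatch p.1 ["deploy", "installation", "setup"] then
    cats.modify "Deployment Guides" [] (· ++ [p])
  else if aMatch p.1 ["config", "settings", "env"] then
    cats.modify "Configuration Files" [] (· ++ [p])
  else if aMatch p.1 ["test", "testing", "spec"] then
    cats.modify "Testing Documentation" [] (· ++ [p])
  else if aMatch p.1 ["architecture", "design", "system"] then
    cats.modify "Architecture Documentation" [] (· ++ [p])
  else if aMatch p.1 ["security", "auth", "rbac"] then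
    cats.modify "Security Documentation" [] (· ++ [p])
  else if aMatch p.1 ["operations", "ops", "monitoring"] then
    cats.modify "Operations Documentation" [] (· ++ [p])
  else if aMatch p.1 ["development", "dev", "contributing"] then
    cats.modify "Development Documentation" [] (· ++ [p])
  else
    cats.modify "Other" [] (· ++ [p])

def categorize_missing_files (broken_links : List (String × Int)) :
    List (String × List (String × Int)) :=
  let categories := broken_links.foldl aStep aInit
  -- 'for category in categories: categories[category].sort(key=lambda x: x[1], reverse=True)'
  let categories := categories.keys.foldl
    (fun d k => d.modify k [] (fun v => PySem.List.sorted v (fun x => x.2) true)) categories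
  categories.items

-- ===== PORT B =====
def bRules : List (String × List String) :=
  [("API Documentation", ["api", "openapi", "swagger"]),
   ("Deployment Guides", ["deploy", "installation", "setup"]),
   ("Configuration Files", ["config", "settings", "env"]),
   ("Testing Documentation", ["test", "testing", "spec"]),
   ("Architecture Documentation", ["architecture", "design", "system"]),
   ("Security Documentation", ["security", "auth", "rbac"]),
   ("Operations Documentation", ["operations", "ops", "monitoring"]),
   ("Development Documentation", ["development", "dev", "contributing"])]

def bNames : List String := bRules.map Prod.fst ++ ["Other"]

-- _cat: index of the first matching rule, len(RULES) if none
def bCat (url : String) : Int :=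
  let low := PySem.Str.lower url
  match bRules.findIdx? (fun r => r.2.any (fun kw => PySem.Str.isIn kw low)) with
  | some i => (i : Int)
  | none => (bRules.length : Int)

def categorize_missing_files_alt (broken_links : List (String × Int)) :
    List (String × List (String × Int)) :=
  (PySem.List.enumerate bNames 0).map (fun e =>
    (e.2, PySem.List.sorted (broken_links.filter (fun p => bCat p.1 == e.1))
            (fun p => p.2) true))

-- ===== PRECONDITION & SPEC =====
def Spec_categorize_missing_files (broken_links : List (String × Int)) (out : List (String × List (String × Int))) : Prop := out = categorize_missing_files_alt broken_links
instance (broken_links : List (String × Int)) (out : List (String × List (String × Int))) : Decidable (Spec_categorize_missing_files broken_links out) := by unfold Spec_categorize_missing_files; infer_instance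

-- ===== CLAIM (what is proved, stated in full; the proofs are below) =====
def Claim_equal_categorize_missing_files : Prop := ∀ (broken_links : List (String × Int)), Dom_categorize_missing_files broken_links → Spec_categorize_missing_files broken_links (categorize_missing_files broken_links)

-- ===== LEMMAS AND PROOFS =====

-- the category name A's cascade routes a url to
def aName (url : String) : String :=
  if aMatch url ["api", "openapi", "swagger"] then "API Documentation"
  else if aMatch url ["deploy", "installation", "setup"] then "Deployment Guides"
  else if aMatch url ["config", "settings", "env"] then "Configuration Files"
  else if aMatch url ["test", "testing", "spec"] then "Testing Documentation"
  else if aMatch url ["architecture", "design", "system"] then "Architecture Documentation"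
  else if aMatch url ["security", "auth", "rbac"] then "Security Documentation"
  else if aMatch url ["operations", "ops", "monitoring"] then "Operations Documentation"
  else if aMatch url ["development", "dev", "contributing"] then "Development Documentation"
  else "Other"

theorem aStep_fun : aStep = fun cats p => cats.modify (aName p.1) [] (· ++ [p]) := by
  funext cats p
  unfold aStep aName
  split_ifs <;> rfl

theorem aName_mem (url : String) : aName url ∈ aInit.keys := by
  unfold aName
  split_ifs <;> decide

theorem update_self {s : PySem.Set String} {xs : List String} (h : ∀ x ∈ xs, x ∈ s) :
    PySem.Set.update s xs = s := by
  rw [PySem.Set.update_eq_append_filter]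
  have hnil : (PySem.Set.ofList xs).filter (fun y => !PySem.Set.contains s y) = [] := by
    rw [List.filter_eq_nil_iff]
    intro y hy
    have hm : y ∈ s := h y ((PySem.Set.mem_ofList xs y).1 hy)
    simp
    exact hm
  rw [hnil, List.append_nil]

theorem items_eq_keys_map (d : PySem.Dict String (List (String × Int))) (h : d.keys.Nodup) :
    d.items = d.keys.map (fun k => (k, d.getD k [])) := by
  show d.items = (d.items.map (·.1)).map (fun k => (k, d.getD k []))
  rw [List.map_map]
  conv_lhs => rw [← List.map_id d.items]
  refine List.map_congr_left (fun p hp => ?_)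
  have : d.getD p.1 [] = p.2 := PySem.Dict.getD_of_mem_items d (by exact hp) h []
  simp [Function.comp, this]

theorem fold_sort_getD (f : List (String × Int) → List (String × Int)) (c : String) :
    ∀ (ks : List String) (d : PySem.Dict String (List (String × Int))), ks.Nodup →
      ((ks.foldl (fun d k => d.modify k [] f) d).getD c []) =
        if c ∈ ks then f (d.getD c []) else d.getD c [] := by
  intro ks
  induction ks with
  | nil => intro d _; simp
  | cons k ks ih =>
      intro d hnd
      rw [List.foldl_cons, ih _ (List.nodup_cons.1 hnd).2]
      by_cases hck : c = k
      · subst hck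
        have hcn : c ∉ ks := (List.nodup_cons.1 hnd).1
        simp [hcn]
      · simp [PySem.Dict.getD_modify, hck, List.mem_cons]

theorem fold_sort_keys (f : List (String × Int) → List (String × Int))
    (d : PySem.Dict String (List (String × Int))) (ks : List String) (h : ∀ x ∈ ks, x ∈ d.keys) :
    (ks.foldl (fun d k => d.modify k [] f) d).keys = d.keys := by
  have := PySem.Dict.keys_foldl_modify ks [] (fun _ _ v => f v) d
  simpa [update_self h] using this

theorem groupfold_getD (bl : List (String × Int)) (c : String) :
    (bl.foldl (fun d p => d.modify (aName p.1) [] (· ++ [p])) aInit).getD c [] =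
      aInit.getD c [] ++ bl.filter (fun p => aName p.1 == c) := by
  have hmap : bl.foldl (fun d p => d.modify (aName p.1) [] (· ++ [p])) aInit =
      (bl.map (fun p => (aName p.1, p))).foldl (fun d q => d.modify q.1 [] (· ++ [q.2])) aInit := by
    rw [List.foldl_map]
  rw [hmap, PySem.Dict.getD_foldl_modify_append, List.filter_map, List.map_map]
  congr 1
  simp [Function.comp_def]
theorem cmp0 (url : String) : (aName url == "API Documentation") = (bCat url == 0) := by
  simp only [aName, aMatch, bCat, bRules, List.findIdx?_cons, List.findIdx?_nil]
  split_ifs <;> decide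
theorem cmp1 (url : String) : (aName url == "Deployment Guides") = (bCat url == 1) := by
  simp only [aName, aMatch, bCat, bRules, List.findIdx?_cons, List.findIdx?_nil]
  split_ifs <;> decide
theorem cmp2 (url : String) : (aName url == "Configuration Files") = (bCat url == 2) := by
  simp only [aName, aMatch, bCat, bRules, List.findIdx?_cons, List.findIdx?_nil]
  split_ifs <;> decide
theorem cmp3 (url : String) : (aName url == "Testing Documentation") = (bCat url == 3) := by
  simp only [aName, aMatch, bCat, bRules, List.findIdx?_cons, List.findIdx?_nil]
  split_ifs <;> decide
theorem cmp4 (url : String) : (aName url == "Architecture Documentation") = (bCat url == 4) := by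
  simp only [aName, aMatch, bCat, bRules, List.findIdx?_cons, List.findIdx?_nil]
  split_ifs <;> decide
theorem cmp5 (url : String) : (aName url == "Security Documentation") = (bCat url == 5) := by
  simp only [aName, aMatch, bCat, bRules, List.findIdx?_cons, List.findIdx?_nil]
  split_ifs <;> decide
theorem cmp6 (url : String) : (aName url == "Operations Documentation") = (bCat url == 6) := by
  simp only [aName, aMatch, bCat, bRules, List.findIdx?_cons, List.findIdx?_nil]
  split_ifs <;> decide
theorem cmp7 (url : String) : (aName url == "Development Documentation") = (bCat url == 7) := by
  simp only [aName, aMatch, bCat, bRules, List.findIdx?_cons, List.findIdx?_nil]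
  split_ifs <;> decide
theorem cmp8 (url : String) : (aName url == "Other") = (bCat url == 8) := by
  simp only [aName, aMatch, bCat, bRules, List.findIdx?_cons, List.findIdx?_nil]
  split_ifs <;> decide

-- ===== VERDICT (by name: the statement is the Claim_ definition above) =====
set_option maxHeartbeats 2000000 in
theorem categorize_missing_files_spec : Claim_equal_categorize_missing_files := by
  unfold Claim_equal_categorize_missing_files
  intro bl _
  unfold Spec_categorize_missing_files categorize_missing_files
  rw [aStep_fun]
  set D1 := bl.foldl (fun d p => d.modify (aName p.1) [] (· ++ [p])) aInit with hD1
  have hkeys : D1.keys = aInit.keys := by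
    have := PySem.Dict.keys_foldl_modify_key bl (fun p => aName p.1) []
      (fun _ p v => v ++ [p]) aInit
    rw [hD1]
    rw [this]
    exact update_self (by intro x hx; simp only [List.mem_map] at hx
                          obtain ⟨p, _, rfl⟩ := hx; exact aName_mem p.1)
  have hK : aInit.keys = ["API Documentation", "Deployment Guides", "Configuration Files",
      "Testing Documentation", "Architecture Documentation", "Security Documentation",
      "Operations Documentation", "Development Documentation", "Other"] := by decide
  have hnd : D1.keys.Nodup := by rw [hkeys, hK]; decide
  set sf : List (String × Int) → List (String × Int) :=
    fun v => PySem.List.sorted v (fun x => x.2) true with hsf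
  set D2 := D1.keys.foldl (fun d k => d.modify k [] sf) D1 with hD2
  have hk2 : D2.keys = D1.keys := fold_sort_keys sf D1 D1.keys (fun x hx => hx)
  have hget : ∀ c, c ∈ D1.keys → D2.getD c [] = sf (aInit.getD c [] ++ bl.filter (fun p => aName p.1 == c)) := by
    intro c hc
    rw [hD2, fold_sort_getD sf c D1.keys D1 hnd, if_pos hc, hD1, groupfold_getD]
  have hitems : D2.items = D2.keys.map (fun k => (k, D2.getD k [])) :=
    items_eq_keys_map D2 (by rw [hk2]; exact hnd)
  rw [hitems, hk2, hkeys, hK]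
  have g : ∀ c, c ∈ aInit.keys → D2.getD c [] = sf (aInit.getD c [] ++ bl.filter (fun p => aName p.1 == c)) := by
    intro c hc; exact hget c (by rw [hkeys]; exact hc)
  rw [List.map_cons, List.map_cons, List.map_cons, List.map_cons, List.map_cons,
      List.map_cons, List.map_cons, List.map_cons, List.map_cons, List.map_nil]
  rw [g _ (by rw [hK]; decide), g _ (by rw [hK]; decide), g _ (by rw [hK]; decide),
      g _ (by rw [hK]; decide), g _ (by rw [hK]; decide), g _ (by rw [hK]; decide),
      g _ (by rw [hK]; decide), g _ (by rw [hK]; decide), g _ (by rw [hK]; decide)]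
  have hInitget : (aInit.getD "API Documentation" [] = []) ∧ (aInit.getD "Deployment Guides" [] = [])
      ∧ (aInit.getD "Configuration Files" [] = []) ∧ (aInit.getD "Testing Documentation" [] = [])
      ∧ (aInit.getD "Architecture Documentation" [] = []) ∧ (aInit.getD "Security Documentation" [] = [])
      ∧ (aInit.getD "Operations Documentation" [] = []) ∧ (aInit.getD "Development Documentation" [] = [])
      ∧ (aInit.getD "Other" [] = []) := by decide
  obtain ⟨e0, e1, e2, e3, e4, e5, e6, e7, e8⟩ := hInitget
  simp only [e0, e1, e2, e3, e4, e5, e6, e7, e8, List.nil_append]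
  unfold categorize_missing_files_alt bNames bRules
  simp only [List.map]
  norm_num [PySem.List.enumerate_cons, PySem.List.enumerate_nil]
  simp only [cmp0, cmp1, cmp2, cmp3, cmp4, cmp5, cmp6, cmp7, cmp8]
  exact ⟨rfl, rfl, rfl, rfl, rfl, rfl, rfl, rfl, rfl⟩
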